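-- pv_equiv track=rewrite | github.com/Andrew-V-Bykov/XML_parsing_for_Elibrary | code/scripts.py | collect_affiliations
-- ===== SOURCE A (Python) =====
-- def collect_affiliations(author_indices, affil_dict):
--     '''Собирает наполнение тегов для аффиляций.'''
--     orgs = []
--     addresses = []
--     other_infos = []
--
--     for idx in author_indices:
--         aff = affil_dict.get(idx)
--         if not aff:
--             continue
--
--         orgs.append(aff["orgName"])
--         addresses.append(aff.get("address", ""))
--
--         if "otherInfo" in aff:
--             other_infos.append(aff["otherInfo"])
--
--     return {"orgName": "; ".join(orgs),
--             "address": "; ".join(a for a in addresses if a),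
--             "otherInfo": "; ".join(other_infos) if other_infos else None
--             }
-- ===== SOURCE B (Python) =====
-- def collect_affiliations(author_indices, affil_dict):
--     '''Maintains the three joined output strings directly (None = no element
--     yet), appending "; " + element as values arrive, instead of accumulating
--     three lists and joining them at the end.'''
--     org = addr = other = None
--     for idx in author_indices:
--         aff = affil_dict.get(idx)
--         if not aff:
--             continue
--         o = aff["orgName"]
--         if org is None:
--             org = o
--         else:
--             org += "; " + o
--         a = aff.get("address", "")
--         if a:
--             if addr is None:
--                 addr = a
--             else:
--                 addr += "; " + a
--         if "otherInfo" in aff: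
--             x = aff["otherInfo"]
--             if other is None:
--                 other = x
--             else:
--                 other += "; " + x
--     return {"orgName": "" if org is None else org,
--             "address": "" if addr is None else addr,
--             "otherInfo": other}
-- ===== Notes on version B (the rewrite author's own statement) =====
-- stated objective: alternative
-- what changed: Instead of A's collect-three-lists-then-'; '.join, B maintains the three joined output strings themselves incrementally (None sentinel for 'no element yet', appending '; ' + element as values arrive), so no intermediate lists and no join calls exist.
import Mathlib
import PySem

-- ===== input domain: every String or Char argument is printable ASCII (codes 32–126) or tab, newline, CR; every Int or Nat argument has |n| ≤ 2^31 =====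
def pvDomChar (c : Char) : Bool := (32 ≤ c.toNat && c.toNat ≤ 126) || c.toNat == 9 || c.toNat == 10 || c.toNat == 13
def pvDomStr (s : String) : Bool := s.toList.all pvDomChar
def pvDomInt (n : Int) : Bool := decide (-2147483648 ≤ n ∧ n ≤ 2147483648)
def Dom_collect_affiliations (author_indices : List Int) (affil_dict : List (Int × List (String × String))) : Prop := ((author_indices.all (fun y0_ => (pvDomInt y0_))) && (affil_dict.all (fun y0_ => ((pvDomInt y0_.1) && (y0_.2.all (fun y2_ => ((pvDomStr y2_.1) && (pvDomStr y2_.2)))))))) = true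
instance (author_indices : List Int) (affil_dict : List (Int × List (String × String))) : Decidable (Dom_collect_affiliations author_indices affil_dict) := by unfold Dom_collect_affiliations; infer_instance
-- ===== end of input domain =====

-- B maintains the three joined strings incrementally (Option sentinels) instead of A's
-- collect-three-lists-then-join; return value proved equal on Pre_.

-- ===== PORT A =====
-- Port of A: one fold over author_indices accumulating the three lists (orgs, addresses, other_infos), joined at the end.
def collect_affiliations (author_indices : List Int) (affil_dict : List (Int × List (String × String))) : List (String × Option String) :=
  let st := author_indices.foldl
    (fun (st : List String × List String × List String) idx =>
      match PySem.Dict.get? (PySem.Dict.mk affil_dict) idx with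
      | none => st
      | some aff =>
        if aff.isEmpty then st
        else
          -- aff["orgName"] raises KeyError when absent: Pre_ excludes that; getD "" is unreachable default
          (st.1 ++ [(PySem.Dict.get? (PySem.Dict.mk aff) "orgName").getD ""],
           st.2.1 ++ [PySem.Dict.getD (PySem.Dict.mk aff) "address" ""],
           if (PySem.Dict.get? (PySem.Dict.mk aff) "otherInfo").isSome
           then st.2.2 ++ [(PySem.Dict.get? (PySem.Dict.mk aff) "otherInfo").getD ""]
           else st.2.2))
    ([], [], [])
  [("orgName", some (PySem.Str.join "; " st.1)),
   ("address", some (PySem.Str.join "; " (st.2.1.filter (fun a => a != "")))),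
   ("otherInfo", if st.2.2.isEmpty then none else some (PySem.Str.join "; " st.2.2))]

-- ===== PORT B =====
-- Python string concatenation cur + "; " + x, exact (port through List Char; Lean's String.append is opaque)
def pvCat3 (cur x : String) : String := String.ofList (cur.toList ++ "; ".toList ++ x.toList)

-- port of: 'cur = x if cur is None else cur += "; " + x'
def pvStepOpt (cur : Option String) (x : String) : Option String :=
  match cur with
  | none => some x
  | some s => some (pvCat3 s x)

def collect_affiliations_alt (author_indices : List Int) (affil_dict : List (Int × List (String × String))) : List (String × Option String) :=
  let st := author_indices.foldl
    (fun (st : Option String × Option String × Option String) idx =>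
      match PySem.Dict.get? (PySem.Dict.mk affil_dict) idx with
      | none => st
      | some aff =>
        if aff.isEmpty then st
        else
          let o := (PySem.Dict.get? (PySem.Dict.mk aff) "orgName").getD ""
          let a := PySem.Dict.getD (PySem.Dict.mk aff) "address" ""
          (pvStepOpt st.1 o,
           if a = "" then st.2.1 else pvStepOpt st.2.1 a,
           match PySem.Dict.get? (PySem.Dict.mk aff) "otherInfo" with
           | some v => pvStepOpt st.2.2 v
           | none => st.2.2))
    (none, none, none)
  [("orgName", some (st.1.getD "")),
   ("address", some (st.2.1.getD "")),
   ("otherInfo", st.2.2)]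

-- ===== PRECONDITION & SPEC =====
-- A raises KeyError when a referenced non-empty affiliation dict lacks "orgName": Pre_ excludes exactly those inputs.
def Pre_collect_affiliations (author_indices : List Int) (affil_dict : List (Int × List (String × String))) : Prop :=
  author_indices.all (fun idx =>
    match PySem.Dict.get? (PySem.Dict.mk affil_dict) idx with
    | none => true
    | some aff => aff.isEmpty || (PySem.Dict.get? (PySem.Dict.mk aff) "orgName").isSome) = true
instance (author_indices : List Int) (affil_dict : List (Int × List (String × String))) : Decidable (Pre_collect_affiliations author_indices affil_dict) := by unfold Pre_collect_affiliations; infer_instance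

def pvWitness_collect_affiliations : List Int × (List (Int × List (String × String))) :=
  ([1, 2], [(1, [("orgName", "Org"), ("address", "Addr")]), (2, [("orgName", "Org2"), ("otherInfo", "x")])])

def Spec_collect_affiliations (author_indices : List Int) (affil_dict : List (Int × List (String × String))) (out : List (String × Option String)) : Prop := out = collect_affiliations_alt author_indices affil_dict
instance (author_indices : List Int) (affil_dict : List (Int × List (String × String))) (out : List (String × Option String)) : Decidable (Spec_collect_affiliations author_indices affil_dict out) := by unfold Spec_collect_affiliations; infer_instance

-- ===== CLAIM (what is proved, stated in full; the proofs are below) =====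
def Claim_equal_collect_affiliations : Prop := ∀ (author_indices : List Int) (affil_dict : List (Int × List (String × String))), Dom_collect_affiliations author_indices affil_dict → Pre_collect_affiliations author_indices affil_dict → Spec_collect_affiliations author_indices affil_dict (collect_affiliations author_indices affil_dict)

-- ===== LEMMAS AND PROOFS =====

-- "join of the elements so far", with none for "no element yet" — the value B's state tracks
def pvOptJoin (xs : List String) : Option String :=
  match xs with
  | [] => none
  | _ :: _ => some (PySem.Str.join "; " xs)

theorem pv_join_append (xs : List String) (x : String) (h : xs ≠ []) :
    PySem.Str.join "; " (xs ++ [x]) = pvCat3 (PySem.Str.join "; " xs) x := by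
  apply String.toList_inj.mp
  simp only [pvCat3, PySem.Str.toList_join, String.toList_ofList, List.map_append]
  induction xs with
  | nil => exact absurd rfl h
  | cons a t ih =>
    cases t with
    | nil => simp [PySem.Chars.join_cons_cons, PySem.Chars.join_singleton]
    | cons b u =>
      simp only [List.map_cons, List.cons_append, PySem.Chars.join_cons_cons] at *
      rw [ih (by simp)]
      simp

theorem pv_stepOpt_optJoin (xs : List String) (x : String) :
    pvStepOpt (pvOptJoin xs) x = pvOptJoin (xs ++ [x]) := by
  cases xs with
  | nil =>
    simp only [pvOptJoin, pvStepOpt, List.nil_append]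
    congr 1
    apply String.toList_inj.mp
    simp [PySem.Chars.join_singleton]
  | cons a t =>
    simp only [pvOptJoin, pvStepOpt, List.cons_append]
    rw [← List.cons_append, pv_join_append (a :: t) x (by simp)]

-- the valid affiliation dicts, in order (shared shape of both folds)
def pvValid (affil_dict : List (Int × List (String × String))) (l : List Int) : List (List (String × String)) :=
  (l.filterMap (fun i => PySem.Dict.get? (PySem.Dict.mk affil_dict) i)).filter (fun aff => !aff.isEmpty)

-- A's fused fold, started from any accumulator, appends the three per-field lists over pvValid.
theorem pv_fold_eq (affil_dict : List (Int × List (String × String))) :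
    ∀ (l : List Int) (st : List String × List String × List String),
      l.foldl
        (fun (st : List String × List String × List String) idx =>
          match PySem.Dict.get? (PySem.Dict.mk affil_dict) idx with
          | none => st
          | some aff =>
            if aff.isEmpty then st
            else
              (st.1 ++ [(PySem.Dict.get? (PySem.Dict.mk aff) "orgName").getD ""],
               st.2.1 ++ [PySem.Dict.getD (PySem.Dict.mk aff) "address" ""],
               if (PySem.Dict.get? (PySem.Dict.mk aff) "otherInfo").isSome
               then st.2.2 ++ [(PySem.Dict.get? (PySem.Dict.mk aff) "otherInfo").getD ""]
               else st.2.2)) st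
      = (st.1 ++ ((pvValid affil_dict l).map (fun a => (PySem.Dict.get? (PySem.Dict.mk a) "orgName").getD "")),
         st.2.1 ++ ((pvValid affil_dict l).map (fun a => PySem.Dict.getD (PySem.Dict.mk a) "address" "")),
         st.2.2 ++ ((pvValid affil_dict l).filterMap (fun a => PySem.Dict.get? (PySem.Dict.mk a) "otherInfo"))) := by
  intro l
  induction l with
  | nil => intro st; simp [pvValid]
  | cons idx rest ih =>
    intro st
    rw [List.foldl_cons]
    simp only [pvValid, List.filterMap_cons]
    cases h : PySem.Dict.get? (PySem.Dict.mk affil_dict) idx with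
    | none => exact ih st
    | some aff =>
      by_cases he : aff.isEmpty = true
      · simp only [he, if_true, List.filter_cons, Bool.not_true]
        exact ih st
      · have he' : aff.isEmpty = false := by revert he; cases aff.isEmpty <;> simp
        simp only [he', Bool.false_eq_true, if_false]
        rw [ih]
        cases ho : (PySem.Dict.get? (PySem.Dict.mk aff) "otherInfo") with
        | none => simp [pvValid, he', ho]
        | some v => simp [pvValid, he', ho]

-- B's fold, started from the optJoins of any three lists, extends them with the same three per-field lists.
theorem pv_foldB_eq (affil_dict : List (Int × List (String × String))) :
    ∀ (l : List Int) (o a t : List String),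
      l.foldl
        (fun (st : Option String × Option String × Option String) idx =>
          match PySem.Dict.get? (PySem.Dict.mk affil_dict) idx with
          | none => st
          | some aff =>
            if aff.isEmpty then st
            else
              let o := (PySem.Dict.get? (PySem.Dict.mk aff) "orgName").getD ""
              let ad := PySem.Dict.getD (PySem.Dict.mk aff) "address" ""
              (pvStepOpt st.1 o,
               if ad = "" then st.2.1 else pvStepOpt st.2.1 ad,
               match PySem.Dict.get? (PySem.Dict.mk aff) "otherInfo" with
               | some v => pvStepOpt st.2.2 v
               | none => st.2.2)) (pvOptJoin o, pvOptJoin a, pvOptJoin t)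
      = (pvOptJoin (o ++ ((pvValid affil_dict l).map (fun a => (PySem.Dict.get? (PySem.Dict.mk a) "orgName").getD ""))),
         pvOptJoin (a ++ (((pvValid affil_dict l).map (fun a => PySem.Dict.getD (PySem.Dict.mk a) "address" "")).filter (fun s => s != ""))),
         pvOptJoin (t ++ ((pvValid affil_dict l).filterMap (fun a => PySem.Dict.get? (PySem.Dict.mk a) "otherInfo")))) := by
  intro l
  induction l with
  | nil => intro o a t; simp [pvValid]
  | cons idx rest ih =>
    intro o a t
    rw [List.foldl_cons]
    simp only [pvValid, List.filterMap_cons]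
    cases h : PySem.Dict.get? (PySem.Dict.mk affil_dict) idx with
    | none => exact ih o a t
    | some aff =>
      by_cases he : aff.isEmpty = true
      · simp only [he, if_true, List.filter_cons, Bool.not_true]
        exact ih o a t
      · have he' : aff.isEmpty = false := by revert he; cases aff.isEmpty <;> simp
        simp only [he', Bool.false_eq_true, if_false]
        by_cases ha : PySem.Dict.getD (PySem.Dict.mk aff) "address" "" = ""
        · cases ho : (PySem.Dict.get? (PySem.Dict.mk aff) "otherInfo") with
          | none =>
            simp only [ha, if_true, pv_stepOpt_optJoin]
            rw [ih (o ++ [(PySem.Dict.get? (PySem.Dict.mk aff) "orgName").getD ""]) a t]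
            simp [pvValid, he', ho, ha]
          | some v =>
            simp only [ha, if_true, pv_stepOpt_optJoin]
            rw [ih (o ++ [(PySem.Dict.get? (PySem.Dict.mk aff) "orgName").getD ""]) a (t ++ [v])]
            simp [pvValid, he', ho, ha]
        · cases ho : (PySem.Dict.get? (PySem.Dict.mk aff) "otherInfo") with
          | none =>
            simp only [ha, if_false, pv_stepOpt_optJoin]
            rw [ih (o ++ [(PySem.Dict.get? (PySem.Dict.mk aff) "orgName").getD ""])
                  (a ++ [PySem.Dict.getD (PySem.Dict.mk aff) "address" ""]) t]
            simp [pvValid, he', ho, ha]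
          | some v =>
            simp only [ha, if_false, pv_stepOpt_optJoin]
            rw [ih (o ++ [(PySem.Dict.get? (PySem.Dict.mk aff) "orgName").getD ""])
                  (a ++ [PySem.Dict.getD (PySem.Dict.mk aff) "address" ""]) (t ++ [v])]
            simp [pvValid, he', ho, ha]

theorem pv_join_getD (xs : List String) :
    PySem.Str.join "; " xs = (pvOptJoin xs).getD "" := by
  cases xs with
  | nil =>
    simp only [pvOptJoin, Option.getD]
    apply String.toList_inj.mp
    simp [PySem.Chars.join_nil]
  | cons a t => simp [pvOptJoin]

theorem pv_other_optJoin (xs : List String) :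
    (if xs.isEmpty then (none : Option String) else some ((pvOptJoin xs).getD "")) = pvOptJoin xs := by
  cases xs <;> simp [pvOptJoin]

-- ===== VERDICT (by name: the statement is the Claim_ definition above) =====
theorem collect_affiliations_spec : Claim_equal_collect_affiliations := by
  intro author_indices affil_dict _ _
  unfold Spec_collect_affiliations collect_affiliations collect_affiliations_alt
  rw [pv_fold_eq affil_dict author_indices ([], [], [])]
  have hb := pv_foldB_eq affil_dict author_indices [] [] []
  simp only [List.nil_append, show pvOptJoin ([] : List String) = none from rfl] at hb
  rw [hb]
  simp only [List.nil_append, pv_join_getD, pv_other_optJoin, List.filter_map]
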